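-- pv_equiv track=rewrite | github.com/VLSIDA/OpenRAM | compiler/tests/22_pex_func_test_with_pinv.py | convert_voltage_unit
-- ===== SOURCE A (Python) =====
-- def convert_voltage_unit(string):
--     newstring = ""
--     for letter in string:
--         if letter == "m":
--             letter = "10e-3"
--         elif letter == "u":
--             letter = "10e-6"
--         else:
--             letter = letter
--         newstring = str(newstring) + str(letter)
--     return newstring
-- ===== SOURCE B (Python) =====
-- def convert_voltage_unit(string):
--     return string.replace("m", "10e-3").replace("u", "10e-6")
-- ===== Notes on version B (the rewrite author's own statement) =====
-- stated objective: simpler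
-- what changed: Replaces the per-character loop with quadratic string concatenation by two chained str.replace calls (the replacement strings contain no 'm' or 'u', so the substitutions commute).
import Mathlib
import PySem

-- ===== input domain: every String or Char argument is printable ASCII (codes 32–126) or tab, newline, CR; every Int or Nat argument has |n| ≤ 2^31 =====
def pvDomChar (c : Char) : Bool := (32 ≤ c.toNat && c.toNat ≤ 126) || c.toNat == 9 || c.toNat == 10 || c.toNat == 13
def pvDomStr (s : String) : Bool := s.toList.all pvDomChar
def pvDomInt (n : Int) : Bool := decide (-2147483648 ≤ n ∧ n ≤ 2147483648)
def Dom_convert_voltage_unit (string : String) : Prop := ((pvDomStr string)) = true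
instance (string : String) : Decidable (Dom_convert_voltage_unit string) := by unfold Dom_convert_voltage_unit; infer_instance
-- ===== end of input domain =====

-- B replaces the per-character loop with two chained str.replace calls ('simpler').

-- ===== PORT A =====
-- newstring accumulated left to right, one letter (or its substitution) appended per step
def convert_voltage_unit (string : String) : String :=
  String.ofList <|
    string.toList.foldl
      (fun newstring letter =>
        newstring ++
          (if letter = 'm' then "10e-3".toList
           else if letter = 'u' then "10e-6".toList
           else [letter]))
      []

-- ===== PORT B =====
def convert_voltage_unit_alt (string : String) : String :=
  PySem.Str.replace (PySem.Str.replace string "m" "10e-3") "u" "10e-6"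

-- ===== PRECONDITION & SPEC =====
def Spec_convert_voltage_unit (string : String) (out : String) : Prop := out = convert_voltage_unit_alt string
instance (string : String) (out : String) : Decidable (Spec_convert_voltage_unit string out) := by unfold Spec_convert_voltage_unit; infer_instance

-- ===== CLAIM (what is proved, stated in full; the proofs are below) =====
def Claim_equal_convert_voltage_unit : Prop := ∀ (string : String), Dom_convert_voltage_unit string → Spec_convert_voltage_unit string (convert_voltage_unit string)

-- ===== LEMMAS AND PROOFS =====

-- single-character replace is a flatMap-style substitution
theorem replace_go_single (m : Char) (new : List Char) :
    ∀ (fuel : Nat) (l acc : List Char), l.length ≤ fuel →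
      PySem.Chars.replace.go [m] new fuel l acc =
        acc.reverse ++ l.flatMap (fun c => if c = m then new else [c]) := by
  intro fuel
  induction fuel with
  | zero =>
    intro l acc h
    have : l = [] := List.eq_nil_of_length_eq_zero (Nat.le_zero.mp h)
    subst this
    simp [PySem.Chars.replace.go]
  | succ n ih =>
    intro l acc h
    cases l with
    | nil => simp [PySem.Chars.replace.go]
    | cons c t =>
      simp only [PySem.Chars.replace.go]
      by_cases hc : c = m
      · subst hc
        rw [show List.isPrefixOf [c] (c :: t) = true by simp [List.isPrefixOf]]
        simp only [if_true]
        rw [show List.drop [c].length (c :: t) = t from rfl]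
        rw [ih t (new.reverse ++ acc) (Nat.lt_succ_iff.mp (by simpa using h))]
        simp [List.flatMap_cons]
      · rw [show List.isPrefixOf [m] (c :: t) = false by
          simp [List.isPrefixOf]; exact fun hmc => (hc hmc.symm).elim]
        simp only [Bool.false_eq_true, if_false]
        rw [ih t (c :: acc) (Nat.lt_succ_iff.mp (by simpa using h))]
        simp [List.flatMap_cons, hc]

theorem replace_single (m : Char) (new l : List Char) :
    PySem.Chars.replace l [m] new = l.flatMap (fun c => if c = m then new else [c]) := by
  rw [PySem.Chars.replace]
  simp only [List.isEmpty_cons, Bool.false_eq_true, if_false]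
  simpa using replace_go_single m new l.length l [] le_rfl

theorem foldl_sub_eq_flatMap (f : Char → List Char) :
    ∀ (l acc : List Char),
      l.foldl (fun ns c => ns ++ f c) acc = acc ++ l.flatMap f := by
  intro l
  induction l with
  | nil => simp
  | cons c t ih => intro acc; simp [List.foldl_cons, ih, List.flatMap_cons]

-- ===== VERDICT (by name: the statement is the Claim_ definition above) =====
theorem convert_voltage_unit_spec : Claim_equal_convert_voltage_unit := by
  intro s _
  unfold Spec_convert_voltage_unit convert_voltage_unit convert_voltage_unit_alt
  simp only [PySem.Str.replace]
  rw [show ("m" : String).toList = ['m'] from rfl, show ("u" : String).toList = ['u'] from rfl]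
  rw [replace_single]
  simp only [String.toList_ofList]
  rw [replace_single]
  rw [foldl_sub_eq_flatMap]
  congr 1
  rw [List.flatMap_assoc]
  apply List.flatMap_congr  -- pointwise equality of the substitutions
  intro c _
  by_cases hm : c = 'm'
  · subst hm; decide
  · by_cases hu : c = 'u'
    · subst hu; decide
    · simp [hm, hu]
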